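-- pv_equiv track=rewrite | github.com/Ajaykumar0616/Smart-Agriculture---Artificial-Neural-Network | Main.py | fertilizer
-- ===== SOURCE A (Python) =====
-- dict2 = {"Cotton":[110, 45, 50], "Sugarcane":[175, 100, 100], "Jowar":[85, 35, 45], "Bajra":[50, 25, 20], "Soyabean":[25,70,20], "Corn":[90, 25, 10], "Rice":[100, 50, 50], "Wheat":[110, 50, 50], "Groundnut":[30, 50, 50]}
--
-- dict3 = {1:"Urea, Ammonium Sulphate, Sodium Nitrate", 2:"Calcium Hydrogen Phosphate or Superphosphate, Ammonium Hydrogen Phosphate or ammophos, Ammonium Phosphate", 3:"Potassium Nitrate or Potassium Sulphate, Potassium Chloride, Potassium Sulphate"}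
--
-- def fertilizer(pc, n, p, k):
--     for key, value in dict2.items():
--         if(pc == key):
--             if(n < value[0] and p < value[1] and k < value[2]):
--                 return("DEFICIENCY of N, P, K FOUND:"+"For N-"+dict3[1]+","+"For P-"+dict3[2]+","+"For K-"+dict3[3])
--             elif(n < value[0] and p < value[1]):
--                 return("DEFICIENCY of N and P FOUND:"+"For N-"+dict3[1]+","+"For P-"+dict3[2])
--             elif(p < value[1] and k < value[2]):
--                 return("DEFICIENCY of P and K FOUND:"+"For P-"+dict3[2]+","+"For K-"+dict3[3])
--             elif(n < value[0] and k < value[2]):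
--                 return("DEFICIENCY of N and K FOUND:"+"For N-"+dict3[1]+","+"For K-"+dict3[3])
--             elif(n < value[0]):
--                 return("DEFICIENCY of N FOUND:"+dict3[1])
--             elif(p < value[1]):
--                 return("DEFICIENCY of P FOUND:"+dict3[2])
--             elif(k < value[2]):
--                 return("DEFICIENCY of K FOUND:"+dict3[3])
--             else:
--                 return("NO DEFICIENCY")
-- ===== SOURCE B (Python) =====
-- dict2 = {"Cotton":[110, 45, 50], "Sugarcane":[175, 100, 100], "Jowar":[85, 35, 45], "Bajra":[50, 25, 20], "Soyabean":[25,70,20], "Corn":[90, 25, 10], "Rice":[100, 50, 50], "Wheat":[110, 50, 50], "Groundnut":[30, 50, 50]}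
--
-- dict3 = {1:"Urea, Ammonium Sulphate, Sodium Nitrate", 2:"Calcium Hydrogen Phosphate or Superphosphate, Ammonium Hydrogen Phosphate or ammophos, Ammonium Phosphate", 3:"Potassium Nitrate or Potassium Sulphate, Potassium Chloride, Potassium Sulphate"}
--
-- def fertilizer(pc, n, p, k):
--     value = dict2.get(pc)
--     if value is None:
--         return None
--     defs = [(letter, dict3[idx])
--             for letter, idx, amt, thr
--             in (("N", 1, n, value[0]), ("P", 2, p, value[1]), ("K", 3, k, value[2]))
--             if amt < thr]
--     if not defs:
--         return "NO DEFICIENCY"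
--     if len(defs) == 1:
--         return "DEFICIENCY of " + defs[0][0] + " FOUND:" + defs[0][1]
--     if len(defs) == 2:
--         header = defs[0][0] + " and " + defs[1][0]
--     else:
--         header = ", ".join(d[0] for d in defs)
--     body = ",".join("For " + l + "-" + f for l, f in defs)
--     return "DEFICIENCY of " + header + " FOUND:" + body
-- ===== Notes on version B (the rewrite author's own statement) =====
-- stated objective: simpler
-- what changed: Replaces A's linear scan over dict2.items() and nine-branch if/elif enumeration of every deficiency combination with a direct dict lookup plus collecting the deficient nutrients into a list and assembling the header/body by joins, branching only on the count.
import Mathlib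
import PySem

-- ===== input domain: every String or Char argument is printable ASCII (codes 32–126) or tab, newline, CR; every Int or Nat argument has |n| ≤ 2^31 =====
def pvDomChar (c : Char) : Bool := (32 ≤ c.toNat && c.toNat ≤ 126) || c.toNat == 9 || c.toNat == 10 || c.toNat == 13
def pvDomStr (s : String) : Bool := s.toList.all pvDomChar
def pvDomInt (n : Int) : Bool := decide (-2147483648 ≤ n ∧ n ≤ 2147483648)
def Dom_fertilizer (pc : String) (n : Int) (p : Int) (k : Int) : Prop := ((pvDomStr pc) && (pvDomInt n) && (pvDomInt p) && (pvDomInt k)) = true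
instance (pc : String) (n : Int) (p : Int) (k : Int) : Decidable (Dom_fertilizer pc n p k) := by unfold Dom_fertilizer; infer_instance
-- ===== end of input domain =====

-- B replaces A's nine-branch if/elif string enumeration by collecting the deficient
-- nutrients in a list and assembling the header/body by joins (objective: simpler).

-- ===== PORT A =====
-- module constants; the compared value is always a 3-element list, ported as a triple
def pvDict2 : List (String × (Int × Int × Int)) :=
  [("Cotton", (110, 45, 50)), ("Sugarcane", (175, 100, 100)), ("Jowar", (85, 35, 45)),
   ("Bajra", (50, 25, 20)), ("Soyabean", (25, 70, 20)), ("Corn", (90, 25, 10)),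
   ("Rice", (100, 50, 50)), ("Wheat", (110, 50, 50)), ("Groundnut", (30, 50, 50))]

def pvD3_1 : String := "Urea, Ammonium Sulphate, Sodium Nitrate"
def pvD3_2 : String := "Calcium Hydrogen Phosphate or Superphosphate, Ammonium Hydrogen Phosphate or ammophos, Ammonium Phosphate"
def pvD3_3 : String := "Potassium Nitrate or Potassium Sulphate, Potassium Chloride, Potassium Sulphate"

-- the if/elif chain in the matched-key branch, step for step
def pvReportA (v : Int × Int × Int) (n p k : Int) : String :=
  if n < v.1 ∧ p < v.2.1 ∧ k < v.2.2 then
    "DEFICIENCY of N, P, K FOUND:" ++ "For N-" ++ pvD3_1 ++ "," ++ "For P-" ++ pvD3_2 ++ "," ++ "For K-" ++ pvD3_3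
  else if n < v.1 ∧ p < v.2.1 then
    "DEFICIENCY of N and P FOUND:" ++ "For N-" ++ pvD3_1 ++ "," ++ "For P-" ++ pvD3_2
  else if p < v.2.1 ∧ k < v.2.2 then
    "DEFICIENCY of P and K FOUND:" ++ "For P-" ++ pvD3_2 ++ "," ++ "For K-" ++ pvD3_3
  else if n < v.1 ∧ k < v.2.2 then
    "DEFICIENCY of N and K FOUND:" ++ "For N-" ++ pvD3_1 ++ "," ++ "For K-" ++ pvD3_3
  else if n < v.1 then "DEFICIENCY of N FOUND:" ++ pvD3_1
  else if p < v.2.1 then "DEFICIENCY of P FOUND:" ++ pvD3_2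
  else if k < v.2.2 then "DEFICIENCY of K FOUND:" ++ pvD3_3
  else "NO DEFICIENCY"

-- the 'for key, value in dict2.items():' loop
def pvScanA : List (String × (Int × Int × Int)) → String → Int → Int → Int → Option String
  | [], _, _, _, _ => none
  | (key, v) :: rest, pc, n, p, k =>
    if pc == key then some (pvReportA v n p k) else pvScanA rest pc n p k

def fertilizer (pc : String) (n : Int) (p : Int) (k : Int) : Option String :=
  pvScanA pvDict2 pc n p k

-- ===== PORT B =====
def pvDict2B : PySem.Dict String (Int × Int × Int) := PySem.Dict.ofList
  [("Cotton", (110, 45, 50)), ("Sugarcane", (175, 100, 100)), ("Jowar", (85, 35, 45)),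
   ("Bajra", (50, 25, 20)), ("Soyabean", (25, 70, 20)), ("Corn", (90, 25, 10)),
   ("Rice", (100, 50, 50)), ("Wheat", (110, 50, 50)), ("Groundnut", (30, 50, 50))]

def pvDict3B : PySem.Dict Int String := PySem.Dict.ofList [(1, pvD3_1), (2, pvD3_2), (3, pvD3_3)]

def fertilizer_alt (pc : String) (n : Int) (p : Int) (k : Int) : Option String :=
  match PySem.Dict.get? pvDict2B pc with
  | none => none
  | some v =>
    -- the filtering comprehension; dict3[idx] lookup always hits, ported with getD
    let defs : List (String × String) :=
      ([("N", (1 : Int), n, v.1), ("P", 2, p, v.2.1), ("K", 3, k, v.2.2)].filter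
        (fun t => decide (t.2.2.1 < t.2.2.2))).map
        (fun t => (t.1, PySem.Dict.getD pvDict3B t.2.1 ""))
    if defs.isEmpty then some "NO DEFICIENCY"
    else if defs.length == 1 then
      -- defs[0] is in range here
      some ("DEFICIENCY of " ++ (defs.getD 0 ("", "")).1 ++ " FOUND:" ++ (defs.getD 0 ("", "")).2)
    else
      let header :=
        if defs.length == 2 then (defs.getD 0 ("", "")).1 ++ " and " ++ (defs.getD 1 ("", "")).1
        else String.intercalate ", " (defs.map (·.1))
      let body := String.intercalate "," (defs.map (fun lf => "For " ++ lf.1 ++ "-" ++ lf.2))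
      some ("DEFICIENCY of " ++ header ++ " FOUND:" ++ body)

-- ===== PRECONDITION & SPEC =====
def Spec_fertilizer (pc : String) (n : Int) (p : Int) (k : Int) (out : Option String) : Prop := out = fertilizer_alt pc n p k
instance (pc : String) (n : Int) (p : Int) (k : Int) (out : Option String) : Decidable (Spec_fertilizer pc n p k out) := by unfold Spec_fertilizer; infer_instance

-- ===== CLAIM (what is proved, stated in full; the proofs are below) =====
def Claim_equal_fertilizer : Prop := ∀ (pc : String) (n : Int) (p : Int) (k : Int), Dom_fertilizer pc n p k → Spec_fertilizer pc n p k (fertilizer pc n p k)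

-- ===== LEMMAS AND PROOFS =====

-- proof-only helper: B's matched-crop branch with the crop's triple abstracted out
def altBody (v : Int × Int × Int) (n p k : Int) : Option String :=
  let defs : List (String × String) :=
    ([("N", (1 : Int), n, v.1), ("P", 2, p, v.2.1), ("K", 3, k, v.2.2)].filter
      (fun t => decide (t.2.2.1 < t.2.2.2))).map
      (fun t => (t.1, PySem.Dict.getD pvDict3B t.2.1 ""))
  if defs.isEmpty then some "NO DEFICIENCY"
  else if defs.length == 1 then
    some ("DEFICIENCY of " ++ (defs.getD 0 ("", "")).1 ++ " FOUND:" ++ (defs.getD 0 ("", "")).2)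
  else
    let header :=
      if defs.length == 2 then (defs.getD 0 ("", "")).1 ++ " and " ++ (defs.getD 1 ("", "")).1
      else String.intercalate ", " (defs.map (·.1))
    let body := String.intercalate "," (defs.map (fun lf => "For " ++ lf.1 ++ "-" ++ lf.2))
    some ("DEFICIENCY of " ++ header ++ " FOUND:" ++ body)

lemma alt_some (pc : String) (n p k : Int) (v : Int × Int × Int)
    (h : PySem.Dict.get? pvDict2B pc = some v) :
    fertilizer_alt pc n p k = altBody v n p k := by
  unfold fertilizer_alt altBody
  rw [h]

lemma alt_none (pc : String) (n p k : Int)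
    (h : PySem.Dict.get? pvDict2B pc = none) :
    fertilizer_alt pc n p k = none := by
  unfold fertilizer_alt
  rw [h]

-- A's if/elif chain and B's collect-and-join assembly agree for every threshold triple
set_option maxRecDepth 4096 in
lemma body_eq (v : Int × Int × Int) (n p k : Int) : altBody v n p k = some (pvReportA v n p k) := by
  obtain ⟨a, b, c⟩ := v
  by_cases hn : n < a <;> by_cases hp : p < b <;> by_cases hk : k < c <;>
    simp [altBody, pvReportA, hn, hp, hk, List.filter, String.intercalate] <;> rfl

-- A's items() scan is dict lookup followed by the report
lemma scan_eq (l : List (String × (Int × Int × Int))) (pc : String) (n p k : Int) :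
    pvScanA l pc n p k = (PySem.Dict.get? (PySem.Dict.mk l) pc).map (fun v => pvReportA v n p k) := by
  induction l with
  | nil => rfl
  | cons kv rest ih =>
    obtain ⟨key, v⟩ := kv
    by_cases h : pc = key
    · subst h
      simp [pvScanA, PySem.Dict.get?_mk_cons]
    · have h1 : (pc == key) = false := by simp [h]
      have h2 : (key == pc) = false := by simp [Ne.symm h]
      simp [pvScanA, PySem.Dict.get?_mk_cons, h1, h2, ih]

-- ===== VERDICT (by name: the statement is the Claim_ definition above) =====
theorem fertilizer_spec : Claim_equal_fertilizer := by
  intro pc n p k _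
  unfold Spec_fertilizer
  have hd : PySem.Dict.mk pvDict2 = pvDict2B := by rfl
  unfold fertilizer
  rw [scan_eq, hd]
  cases h : PySem.Dict.get? pvDict2B pc with
  | none => rw [alt_none pc n p k h]; rfl
  | some v => rw [alt_some pc n p k v h, body_eq]; rfl
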